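-- pv_equiv track=rewrite | github.com/chodhitha03/AIAC-LAB | Assigment6/Task1.py | automorphic_numbers_in_range_while
-- ===== SOURCE A (Python) =====
-- def is_automorphic(num):
--     square = num * num
--     num_str = str(num)
--     square_str = str(square)
--     return square_str.endswith(num_str)
--
-- def automorphic_numbers_in_range_while(start, end):
--     automorphic_numbers = []
--     num = start
--     while num <= end:
--         if is_automorphic(num):
--             automorphic_numbers.append(num)
--         num += 1
--     return automorphic_numbers
-- ===== SOURCE B (Python) =====
-- def automorphic_numbers_in_range_while(start, end):
--     # Automorphic numbers with d digits are exactly the idempotents mod 10**d that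
--     # have d digits; generate them per digit length instead of scanning the range.
--     result = []
--     d = 1
--     while 10 ** (d - 1) <= max(end, 1):
--         m = 10 ** d
--         e = 5                      # converges to the idempotent = 0 mod 5**d, 1 mod 2**d
--         for _ in range(d):
--             e = e * e % m
--         f = (m + 1 - e) % m        # the complementary idempotent
--         if d == 1:
--             cands = [0, 1, e, f]
--         else:
--             cands = [c for c in (min(e, f), max(e, f)) if c * 10 >= m]
--         for c in cands:
--             if start <= c <= end:
--                 result.append(c)
--         d += 1
--     return result
-- ===== Notes on version B (the rewrite author's own statement) =====
-- stated objective: faster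
-- what changed: Instead of scanning every integer in [start,end] and testing str(n*n).endswith(str(n)), B generates for each digit length d the idempotents mod 10**d (the squaring iteration converging to the 10-adic fixed points) and filters the at-most-four candidates per digit length to the range.
import Mathlib
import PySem

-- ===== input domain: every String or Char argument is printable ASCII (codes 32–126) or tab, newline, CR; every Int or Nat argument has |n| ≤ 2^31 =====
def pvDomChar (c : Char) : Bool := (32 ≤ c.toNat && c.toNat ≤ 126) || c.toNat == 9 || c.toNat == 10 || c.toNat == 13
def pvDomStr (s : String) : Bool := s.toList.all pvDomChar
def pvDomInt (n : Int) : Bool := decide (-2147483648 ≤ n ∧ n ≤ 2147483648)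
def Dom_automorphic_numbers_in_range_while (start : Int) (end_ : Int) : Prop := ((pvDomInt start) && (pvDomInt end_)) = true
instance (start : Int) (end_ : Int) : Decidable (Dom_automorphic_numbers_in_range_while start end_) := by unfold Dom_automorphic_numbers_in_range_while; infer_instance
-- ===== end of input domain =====

-- B replaces A's per-integer string scan of [start,end] by generating, for each digit
-- length d, the idempotents mod 10^d (via the squaring iteration converging to the
-- 10-adic fixed points) and filtering the at-most-four candidates to the range.


-- ===== PORT A =====
def is_automorphicA (num : Int) : Bool :=
  let square := num * num
  let num_str := PySem.Int.toStr num
  let square_str := PySem.Int.toStr square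
  PySem.Str.endswith square_str num_str

-- the body of A's while loop; fuel = the number of iterations (end - start + 1, clamped at 0)
def pvLoopA : Nat → Int → List Int → List Int
  | 0, _, acc => acc
  | f + 1, num, acc => pvLoopA f (num + 1) (if is_automorphicA num then acc ++ [num] else acc)

def automorphic_numbers_in_range_while (start : Int) (end_ : Int) : List Int :=
  pvLoopA (end_ + 1 - start).toNat start []

-- ===== PORT B =====
-- 'e = 5; for _ in range(d): e = e*e % m' of Source B (all quantities are nonnegative ints: ported on Nat, exact)
def pvEIter (m : Nat) : Nat → Nat → Nat
  | 0, e => e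
  | k + 1, e => pvEIter m k (e * e % m)

-- 'cands' of Source B: candidate automorphic numbers with digit length d
def pvCands (d : Nat) : List Nat :=
  let m := 10 ^ d
  let e := pvEIter m d 5
  let f := (m + 1 - e) % m
  if d = 1 then [0, 1, e, f]
  else ([min e f, max e f]).filter (fun c => decide (m ≤ c * 10))

-- Source B's outer while loop over digit lengths d; fuel is an upper bound on the iterations
def pvLoopB (start end_ : Int) : Nat → Nat → List Int → List Int
  | 0, _, res => res
  | fuel + 1, d, res =>
      if ((10 ^ (d - 1) : Nat) : Int) ≤ max end_ 1 then
        pvLoopB start end_ fuel (d + 1)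
          (res ++ (((pvCands d).map (fun (c : Nat) => (c : Int))).filter
                    (fun c => decide (start ≤ c) && decide (c ≤ end_))))
      else res

def automorphic_numbers_in_range_while_alt (start : Int) (end_ : Int) : List Int :=
  pvLoopB start end_ ((max end_ 1).toNat + 1) 1 []

-- ===== PRECONDITION & SPEC =====
def Spec_automorphic_numbers_in_range_while (start : Int) (end_ : Int) (out : List Int) : Prop := out = automorphic_numbers_in_range_while_alt start end_
instance (start : Int) (end_ : Int) (out : List Int) : Decidable (Spec_automorphic_numbers_in_range_while start end_ out) := by unfold Spec_automorphic_numbers_in_range_while; infer_instance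

-- ===== CLAIM (what is proved, stated in full; the proofs are below) =====
def Claim_equal_automorphic_numbers_in_range_while : Prop := ∀ (start : Int) (end_ : Int), Dom_automorphic_numbers_in_range_while start end_ → Spec_automorphic_numbers_in_range_while start end_ (automorphic_numbers_in_range_while start end_)

-- ===== LEMMAS AND PROOFS =====

-- number of decimal digits of m (as printed by str())
def pvDlen (m : Nat) : Nat := (Nat.toDigits 10 m).length

-- m is automorphic in A's sense, phrased arithmetically
def pvAutoN (m : Nat) : Prop := m * m % 10 ^ pvDlen m = m

def pvE (d : Nat) : Nat := pvEIter (10 ^ d) d 5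
def pvF (d : Nat) : Nat := (10 ^ d + 1 - pvE d) % 10 ^ d

theorem pvLoopA_eq : ∀ (f : Nat) (num : Int) (acc : List Int),
    pvLoopA f num acc = acc ++ ((List.range f).map (fun (k : Nat) => num + (k : Int))).filter is_automorphicA := by
  intro f
  induction f with
  | zero => intro num acc; simp [pvLoopA]
  | succ f ih =>
    intro num acc
    rw [pvLoopA, ih, List.range_succ_eq_map]
    have hmap : (List.map Nat.succ (List.range f)).map (fun (k : Nat) => num + (k : Int))
        = (List.range f).map (fun (k : Nat) => (num + 1) + (k : Int)) := by
      rw [List.map_map]; apply List.map_congr_left; intro k _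
      simp only [Function.comp_apply, Nat.succ_eq_add_one]; push_cast; ring
    simp only [List.map_cons, hmap, List.filter_cons]
    by_cases h : is_automorphicA num <;> simp [h]

theorem pvEIter_modEq (m : Nat) : ∀ (k : Nat) (e : Nat), pvEIter m k e ≡ e ^ (2 ^ k) [MOD m] := by
  intro k
  induction k with
  | zero => intro e; simp [pvEIter, Nat.ModEq.refl]
  | succ k ih =>
    intro e
    calc pvEIter m (k+1) e = pvEIter m k (e * e % m) := rfl
      _ ≡ (e * e % m) ^ (2 ^ k) [MOD m] := ih _
      _ ≡ (e * e) ^ (2 ^ k) [MOD m] := Nat.ModEq.pow _ (Nat.mod_modEq _ _)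
      _ = e ^ (2 ^ (k + 1)) := by rw [← pow_two, ← pow_mul, ← pow_succ']

theorem pvEIter_lt (m : Nat) (hm : 0 < m) : ∀ (k : Nat), 0 < k → ∀ e, pvEIter m k e < m := by
  intro k
  induction k with
  | zero => omega
  | succ k ih =>
    intro _ e
    cases k with
    | zero => simpa [pvEIter] using Nat.mod_lt _ hm
    | succ k => exact ih (by omega) _

theorem pvFive_pow_mod : ∀ k : Nat, 5 ^ 2 ^ k ≡ 1 [MOD 2 ^ (k + 2)] := by
  intro k
  induction k with
  | zero => decide
  | succ k ih =>
    have hx : 5 ^ 2 ^ k % 2 ^ (k + 2) = 1 % 2 ^ (k + 2) := ih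
    have h2le : (2:Nat) ≤ 2 ^ (k+2) := by
      calc (2:Nat) = 2 ^ 1 := rfl
        _ ≤ 2 ^ (k+2) := Nat.pow_le_pow_right (by norm_num) (by omega)
    have h1 : (1 : Nat) % 2 ^ (k + 2) = 1 := Nat.mod_eq_of_lt (by omega)
    set x := 5 ^ 2 ^ k with hxdef
    have hdecomp := Nat.div_add_mod x (2 ^ (k + 2))
    set t := x / 2 ^ (k + 2) with htdef
    have hx1 : x = 2 ^ (k+2) * t + 1 := by omega
    have hsq : x ^ 2 = 2 ^ (k + 3) * (2 ^ (k+1) * t ^ 2 + t) + 1 := by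
      rw [hx1, show (2:Nat)^(k+2) = 4 * 2^k from by rw [pow_add]; ring,
          show (2:Nat)^(k+3) = 8 * 2^k from by rw [pow_add]; ring,
          show (2:Nat)^(k+1) = 2 * 2^k from by rw [pow_add]; ring]
      ring
    show 5 ^ 2 ^ (k+1) % 2 ^ (k + 3) = 1 % 2 ^ (k + 3)
    have hpw : 5 ^ 2 ^ (k+1) = x ^ 2 := by rw [hxdef, ← pow_mul, pow_succ]
    have h1' : (1 : Nat) % 2 ^ (k + 3) = 1 := Nat.mod_eq_of_lt (by
      have : (2:Nat) ≤ 2 ^ (k+3) := by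
        calc (2:Nat) = 2 ^ 1 := rfl
          _ ≤ 2 ^ (k+3) := Nat.pow_le_pow_right (by norm_num) (by omega)
      omega)
    rw [hpw, hsq, Nat.mul_add_mod]

theorem pvPrimePow_split {p d a b : Nat} (hp : p.Prime) (h : p ^ d ∣ a * b) (hab : a.Coprime b) :
    p ^ d ∣ a ∨ p ^ d ∣ b := by
  by_cases hpa : p ∣ a
  · left
    have hpb : ¬ p ∣ b := by
      intro hb
      have hg : p ∣ Nat.gcd a b := Nat.dvd_gcd hpa hb
      rw [hab] at hg
      have := Nat.le_of_dvd one_pos hg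
      have := hp.two_le
      omega
    have hcop : (p ^ d).Coprime b := by
      have := (hp.coprime_iff_not_dvd).2 hpb
      simpa using Nat.Coprime.pow (l := b) d 1 this
    exact hcop.dvd_of_dvd_mul_right h
  · right
    have hcop : (p ^ d).Coprime a := by
      have := (hp.coprime_iff_not_dvd).2 hpa
      simpa using Nat.Coprime.pow (l := a) d 1 this
    exact hcop.dvd_of_dvd_mul_left h

theorem pvCRT_unique {d x y : Nat} (hx : x < 10 ^ d) (hy : y < 10 ^ d)
    (h2 : x % 2 ^ d = y % 2 ^ d) (h5 : x % 5 ^ d = y % 5 ^ d) : x = y := by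
  have hcop : (2 ^ d).Coprime (5 ^ d) := Nat.Coprime.pow d d (by decide)
  have h10 : (2:Nat) ^ d * 5 ^ d = 10 ^ d := by rw [← mul_pow]; norm_num
  have hmm := (Nat.modEq_and_modEq_iff_modEq_mul hcop).1 ⟨h2, h5⟩
  rw [h10] at hmm
  have := hmm
  unfold Nat.ModEq at this
  rw [Nat.mod_eq_of_lt hx, Nat.mod_eq_of_lt hy] at this
  exact this

theorem pvSortedExt : ∀ (l1 l2 : List Int), l1.Pairwise (· < ·) → l2.Pairwise (· < ·) →
    (∀ x, (x ∈ l1 ↔ x ∈ l2)) → l1 = l2 := by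
  intro l1
  induction l1 with
  | nil =>
    intro l2 _ _ h
    cases l2 with
    | nil => rfl
    | cons b t => exact absurd ((h b).2 (List.mem_cons_self)) (List.not_mem_nil)
  | cons a t ih =>
    intro l2 h1 h2 h
    cases l2 with
    | nil => exact absurd ((h a).1 (List.mem_cons_self)) (List.not_mem_nil)
    | cons b t2 =>
      have hab : a = b := by
        have ha2 : a ∈ b :: t2 := (h a).1 List.mem_cons_self
        have hb1 : b ∈ a :: t := (h b).2 List.mem_cons_self
        rcases List.mem_cons.1 ha2 with h' | h'
        · exact h'
        · rcases List.mem_cons.1 hb1 with h'' | h''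
          · exact h''.symm
          · have hab2 : a < b := (List.pairwise_cons.1 h1).1 _ h''
            have hba2 : b < a := (List.pairwise_cons.1 h2).1 _ h'
            omega
      subst hab
      congr 1
      apply ih t2 (List.pairwise_cons.1 h1).2 (List.pairwise_cons.1 h2).2
      intro x
      constructor
      · intro hx
        have : x ∈ a :: t2 := (h x).1 (List.mem_cons_of_mem _ hx)
        rcases List.mem_cons.1 this with rfl | h'
        · exact absurd hx (by
            intro hmem
            exact lt_irrefl x ((List.pairwise_cons.1 h1).1 _ hmem))
        · exact h'
      · intro hx
        have : x ∈ a :: t := (h x).2 (List.mem_cons_of_mem _ hx)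
        rcases List.mem_cons.1 this with rfl | h'
        · exact absurd hx (by
            intro hmem
            exact lt_irrefl x ((List.pairwise_cons.1 h2).1 _ hmem))
        · exact h'

theorem pvTen_pos (d : Nat) : 0 < 10 ^ d := pow_pos (by norm_num) d

theorem pvTen_eq (d : Nat) : (10:Nat) ^ d = 2 ^ d * 5 ^ d := by
  rw [← mul_pow]; norm_num

theorem pvE_lt {d : Nat} (hd : 0 < d) : pvE d < 10 ^ d :=
  pvEIter_lt _ (pvTen_pos d) d hd 5

theorem pvTwoPow_dvd_tenPow (d : Nat) : (2:Nat) ^ d ∣ 10 ^ d := ⟨5 ^ d, pvTen_eq d⟩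
theorem pvFivePow_dvd_tenPow (d : Nat) : (5:Nat) ^ d ∣ 10 ^ d := ⟨2 ^ d, by rw [pvTen_eq d]; ring⟩

theorem pvE_modEq_pow (d : Nat) : pvE d ≡ 5 ^ 2 ^ d [MOD 10 ^ d] := pvEIter_modEq _ d 5

theorem pvE_mod2 {d : Nat} (hd : 0 < d) : pvE d % 2 ^ d = 1 := by
  have h1 : pvE d ≡ 5 ^ 2 ^ d [MOD 2 ^ d] :=
    (pvE_modEq_pow d).of_dvd (pvTwoPow_dvd_tenPow d)
  have h2 : 5 ^ 2 ^ d ≡ 1 [MOD 2 ^ d] :=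
    (pvFive_pow_mod d).of_dvd (pow_dvd_pow 2 (by omega))
  have h := h1.trans h2
  unfold Nat.ModEq at h
  have h1e : 1 % 2 ^ d = 1 := Nat.mod_eq_of_lt (Nat.one_lt_two_pow_iff.2 (by omega))
  rwa [h1e] at h

theorem pvE_mod5 {d : Nat} (hd : 0 < d) : pvE d % 5 ^ d = 0 := by
  have h1 : pvE d ≡ 5 ^ 2 ^ d [MOD 5 ^ d] :=
    (pvE_modEq_pow d).of_dvd (pvFivePow_dvd_tenPow d)
  have h2 : 5 ^ 2 ^ d ≡ 0 [MOD 5 ^ d] :=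
    (Nat.modEq_zero_iff_dvd).2 (pow_dvd_pow 5 (Nat.lt_two_pow_self).le)
  have h := h1.trans h2
  unfold Nat.ModEq at h
  rwa [Nat.zero_mod] at h

theorem pvE_ge {d : Nat} (hd : 0 < d) : 5 ^ d ≤ pvE d := by
  have h5 : 5 ^ d ∣ pvE d := Nat.dvd_iff_mod_eq_zero.mpr (pvE_mod5 hd)
  have : pvE d ≠ 0 := by
    intro h0
    have := pvE_mod2 hd
    rw [h0] at this
    simp at this
  exact Nat.le_of_dvd (Nat.pos_of_ne_zero this) h5

theorem pvF_eq {d : Nat} (hd : 0 < d) : pvF d = 10 ^ d + 1 - pvE d := by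
  unfold pvF
  apply Nat.mod_eq_of_lt
  have h1 := pvE_ge hd
  have h2 : (5:Nat) ≤ 5 ^ d := by
    calc (5:Nat) = 5 ^ 1 := rfl
      _ ≤ 5 ^ d := Nat.pow_le_pow_right (by norm_num) (by omega)
  have h3 := pvTen_pos d
  omega

theorem pvF_lt {d : Nat} (hd : 0 < d) : pvF d < 10 ^ d := by
  rw [pvF_eq hd]
  have := pvE_ge hd
  have h2 : (5:Nat) ≤ 5 ^ d := by
    calc (5:Nat) = 5 ^ 1 := rfl
      _ ≤ 5 ^ d := Nat.pow_le_pow_right (by norm_num) (by omega)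
  have h3 := pvTen_pos d
  omega

theorem pvF_mod2 {d : Nat} (hd : 0 < d) : pvF d % 2 ^ d = 0 := by
  have he := pvE_mod2 hd
  have hlt := pvE_lt hd
  have hdecomp := Nat.div_add_mod (pvE d) (2 ^ d)
  set a := pvE d / 2 ^ d with ha
  have hE : pvE d = 2 ^ d * a + 1 := by omega
  have ha5 : a ≤ 5 ^ d := by
    by_contra hc
    push_neg at hc
    have : 2 ^ d * 5 ^ d < 2 ^ d * a := (Nat.mul_lt_mul_left (pow_pos (by norm_num) d)).2 hc
    rw [← pvTen_eq d] at this
    omega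
  have hXY : 2 ^ d * a ≤ 2 ^ d * 5 ^ d := Nat.mul_le_mul_left _ ha5
  have hsub : 2 ^ d * (5 ^ d - a) = 2 ^ d * 5 ^ d - 2 ^ d * a := Nat.mul_sub _ _ _
  have hF : pvF d = 2 ^ d * (5 ^ d - a) := by
    rw [pvF_eq hd, hE, pvTen_eq d]
    omega
  rw [hF, Nat.mul_mod_right]

theorem pvF_mod5 {d : Nat} (hd : 0 < d) : pvF d % 5 ^ d = 1 := by
  have he := pvE_mod5 hd
  have hlt := pvE_lt hd
  obtain ⟨b, hb⟩ : 5 ^ d ∣ pvE d := Nat.dvd_iff_mod_eq_zero.mpr he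
  have hb2 : b ≤ 2 ^ d := by
    by_contra hc
    push_neg at hc
    have h1 : 5 ^ d * 2 ^ d < 5 ^ d * b := (Nat.mul_lt_mul_left (pow_pos (by norm_num) d)).2 hc
    have h2 : (10:Nat) ^ d = 5 ^ d * 2 ^ d := by rw [pvTen_eq d]; ring
    omega
  have hXY : 5 ^ d * b ≤ 5 ^ d * 2 ^ d := Nat.mul_le_mul_left _ hb2
  have hsub : 5 ^ d * (2 ^ d - b) = 5 ^ d * 2 ^ d - 5 ^ d * b := Nat.mul_sub _ _ _
  have h10 : (10:Nat) ^ d = 5 ^ d * 2 ^ d := by rw [pvTen_eq d]; ring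
  have hEge := pvE_ge hd
  have h5gt : 1 < 5 ^ d := Nat.one_lt_pow (by omega) (by norm_num)
  have hF : pvF d = 5 ^ d * (2 ^ d - b) + 1 := by
    rw [pvF_eq hd, hb, h10]
    omega
  rw [hF, Nat.mul_add_mod, Nat.mod_eq_of_lt h5gt]

-- squares of 0/1-residues: if m % q ∈ {0,1} then m*m ≡ m mod q
theorem pvSq_modEq {q m : Nat} (hq : 1 < q) (h : m % q = 0 ∨ m % q = 1) :
    m * m % q = m % q := by
  rw [Nat.mul_mod]
  rcases h with h | h <;> rw [h] <;> simp [Nat.mod_eq_of_lt hq]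

theorem pvIdem_iff {d : Nat} (hd : 0 < d) {m : Nat} (hm : m < 10 ^ d) :
    m * m % 10 ^ d = m ↔ m = 0 ∨ m = 1 ∨ m = pvE d ∨ m = pvF d := by
  have h2pos : 1 < 2 ^ d := Nat.one_lt_two_pow_iff.2 (by omega)
  have h5pos : 1 < 5 ^ d := Nat.one_lt_pow (by omega) (by norm_num)
  constructor
  · intro h
    rcases Nat.eq_zero_or_pos m with rfl | hm1
    · exact Or.inl rfl
    -- 10^d ∣ m*(m-1)
    have hle : m ≤ m * m := Nat.le_mul_of_pos_left m hm1
    have hdvd : 10 ^ d ∣ m * m - m := by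
      have : m ≡ m * m [MOD 10 ^ d] := by
        unfold Nat.ModEq
        rw [h, Nat.mod_eq_of_lt hm]
      exact (Nat.modEq_iff_dvd' hle).1 this
    have hmm : m * m - m = m * (m - 1) := by
      rw [Nat.mul_sub]; omega
    rw [hmm] at hdvd
    have hcop : m.Coprime (m - 1) := by
      have h1 : m = (m - 1) + 1 := by omega
      rw [h1]
      simp [Nat.Coprime]
    have h2 : 2 ^ d ∣ m * (m - 1) := dvd_trans ⟨5 ^ d, pvTen_eq d⟩ hdvd
    have h5 : 5 ^ d ∣ m * (m - 1) := dvd_trans ⟨2 ^ d, by rw [pvTen_eq d]; ring⟩ hdvd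
    have hr2 : m % 2 ^ d = 0 ∨ m % 2 ^ d = 1 := by
      rcases pvPrimePow_split Nat.prime_two h2 hcop with h' | h'
      · exact Or.inl (Nat.mod_eq_zero_of_dvd h')
      · right
        have : m ≡ 1 [MOD 2 ^ d] := by
          have h1m : 1 ≤ m := hm1
          exact ((Nat.modEq_iff_dvd' h1m).2 h').symm
        unfold Nat.ModEq at this
        rwa [Nat.mod_eq_of_lt h2pos] at this
    have hr5 : m % 5 ^ d = 0 ∨ m % 5 ^ d = 1 := by
      rcases pvPrimePow_split (by norm_num : Nat.Prime 5) h5 hcop with h' | h'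
      · exact Or.inl (Nat.mod_eq_zero_of_dvd h')
      · right
        have : m ≡ 1 [MOD 5 ^ d] := ((Nat.modEq_iff_dvd' hm1).2 h').symm
        unfold Nat.ModEq at this
        rwa [Nat.mod_eq_of_lt h5pos] at this
    rcases hr2 with h2' | h2' <;> rcases hr5 with h5' | h5'
    · exact Or.inl (pvCRT_unique hm (pvTen_pos d) (by simpa using h2') (by simpa using h5'))
    · refine Or.inr (Or.inr (Or.inr (pvCRT_unique hm (pvF_lt hd) ?_ ?_)))
      · rw [h2', pvF_mod2 hd]
      · rw [h5', pvF_mod5 hd]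
    · refine Or.inr (Or.inr (Or.inl (pvCRT_unique hm (pvE_lt hd) ?_ ?_)))
      · rw [h2', pvE_mod2 hd]
      · rw [h5', pvE_mod5 hd]
    · refine Or.inr (Or.inl (pvCRT_unique hm (by omega : (1:Nat) < 10 ^ d) ?_ ?_))
      · rw [h2', Nat.mod_eq_of_lt h2pos]
      · rw [h5', Nat.mod_eq_of_lt h5pos]
  · intro h
    have key : ∀ x : Nat, x < 10 ^ d → (x % 2 ^ d = 0 ∨ x % 2 ^ d = 1) →
        (x % 5 ^ d = 0 ∨ x % 5 ^ d = 1) → x * x % 10 ^ d = x := by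
      intro x hx hx2 hx5
      have hcop : (2 ^ d).Coprime (5 ^ d) := Nat.Coprime.pow d d (by decide)
      have e2 : x * x ≡ x [MOD 2 ^ d] := by
        unfold Nat.ModEq; exact pvSq_modEq h2pos hx2
      have e5 : x * x ≡ x [MOD 5 ^ d] := by
        unfold Nat.ModEq; exact pvSq_modEq h5pos hx5
      have := (Nat.modEq_and_modEq_iff_modEq_mul hcop).1 ⟨e2, e5⟩
      rw [← pvTen_eq d] at this
      unfold Nat.ModEq at this
      rwa [Nat.mod_eq_of_lt hx] at this
    rcases h with rfl | rfl | rfl | rfl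
    · simp
    · exact key 1 (by omega) (Or.inr (Nat.mod_eq_of_lt h2pos)) (Or.inr (Nat.mod_eq_of_lt h5pos))
    · exact key _ (pvE_lt hd) (Or.inr (pvE_mod2 hd)) (Or.inl (pvE_mod5 hd))
    · exact key _ (pvF_lt hd) (Or.inl (pvF_mod2 hd)) (Or.inr (pvF_mod5 hd))

theorem pvDigitChar_inj : ∀ x < 10, ∀ y < 10, Nat.digitChar x = Nat.digitChar y → x = y := by decide

-- [x] is a suffix of l ++ [y] iff x = y
theorem pvSingleton_suffix {α : Type} (x y : α) (l : List α) : ([x] <:+ l ++ [y]) ↔ x = y := by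
  rw [← List.reverse_prefix]
  simp only [List.reverse_append, List.reverse_cons, List.reverse_nil, List.nil_append,
    List.cons_append]
  rw [List.cons_prefix_cons]
  simp

theorem pvConcat_suffix {α : Type} (x y : α) (l1 l2 : List α) :
    (l1 ++ [x] <:+ l2 ++ [y]) ↔ x = y ∧ (l1 <:+ l2) := by
  rw [← List.reverse_prefix]
  simp only [List.reverse_append, List.reverse_singleton, List.singleton_append]
  rw [List.cons_prefix_cons, List.reverse_prefix]

theorem pvSuffix_iff : ∀ b a : Nat,
    (Nat.toDigits 10 b <:+ Nat.toDigits 10 a) ↔ a % 10 ^ (Nat.toDigits 10 b).length = b := by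
  intro b
  induction b using Nat.strong_induction_on with
  | _ b ih =>
    intro a
    by_cases hb : b < 10
    · rw [Nat.toDigits_of_lt_base hb]
      simp only [List.length_singleton, pow_one]
      by_cases ha : a < 10
      · rw [Nat.toDigits_of_lt_base ha]
        constructor
        · intro h
          have heq : ([b.digitChar] : List Char) = [a.digitChar] := h.eq_of_length (by simp)
          simp only [List.cons.injEq, and_true] at heq
          rw [Nat.mod_eq_of_lt ha]
          exact (pvDigitChar_inj b hb a ha heq).symm
        · intro h
          rw [Nat.mod_eq_of_lt ha] at h
          subst h
          exact List.suffix_rfl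
      · push_neg at ha
        rw [Nat.toDigits_eq_if (by norm_num), if_neg (by omega), pvSingleton_suffix]
        constructor
        · intro h
          exact (pvDigitChar_inj _ hb _ (Nat.mod_lt _ (by norm_num)) h).symm
        · intro h
          rw [h]
    · push_neg at hb
      rw [Nat.toDigits_eq_if (b := 10) (by norm_num), if_neg (by omega)]
      by_cases ha : a < 10
      · rw [Nat.toDigits_of_lt_base ha]
        constructor
        · intro h
          exfalso
          have hlen := List.IsSuffix.length_le h
          simp only [List.length_append, List.length_singleton] at hlen
          have := Nat.length_toDigits_pos (b := 10) (n := b / 10)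
          omega
        · intro h
          exfalso
          have hL : 0 < (Nat.toDigits 10 (b/10)).length := Nat.length_toDigits_pos
          have hbig : a < 10 ^ ((Nat.toDigits 10 (b / 10)).length + 1) := by
            calc a < 10 := ha
              _ = 10 ^ 1 := (pow_one 10).symm
              _ ≤ _ := Nat.pow_le_pow_right (by norm_num) (by omega)
          rw [List.length_append, List.length_singleton, Nat.mod_eq_of_lt hbig] at h
          omega
      · push_neg at ha
        rw [Nat.toDigits_eq_if (b := 10) (n := a) (by norm_num), if_neg (by omega), pvConcat_suffix]
        have hrec := ih (b / 10) (by omega) (a / 10)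
        set L := (Nat.toDigits 10 (b/10)).length with hLdef
        have hL : 0 < L := Nat.length_toDigits_pos
        have hblt : b / 10 < 10 ^ L := (Nat.length_toDigits_le_iff (by norm_num) hL).1 le_rfl
        have hmul : a % (10 ^ (L + 1)) = a % 10 + 10 * (a / 10 % 10 ^ L) := by
          rw [pow_succ']
          exact Nat.mod_mul
        rw [List.length_append, List.length_singleton]
        have hb10 : b % 10 < 10 := Nat.mod_lt _ (by norm_num)
        have ha10 : a % 10 < 10 := Nat.mod_lt _ (by norm_num)
        have hbdec := Nat.div_add_mod b 10
        have hadiv : a / 10 % 10 ^ L < 10 ^ L := Nat.mod_lt _ (pow_pos (by norm_num) _)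
        constructor
        · rintro ⟨hc, hsuf⟩
          have hmod : b % 10 = a % 10 :=
            pvDigitChar_inj _ (Nat.mod_lt _ (by norm_num)) _ (Nat.mod_lt _ (by norm_num)) hc
          have hdiv : a / 10 % 10 ^ L = b / 10 := hrec.1 hsuf
          rw [hmul, hdiv, ← hmod]
          omega
        · intro h
          rw [hmul] at h
          have hmod : b % 10 = a % 10 := by omega
          have hdiv : a / 10 % 10 ^ L = b / 10 := by omega
          exact ⟨by rw [hmod], hrec.2 hdiv⟩

theorem pvIsAuto_iff (n : Int) : is_automorphicA n = true ↔ 0 ≤ n ∧ pvAutoN n.toNat := by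
  unfold is_automorphicA
  simp only [PySem.Str.endswith_eq, PySem.Int.toList_toStr, PySem.Chars.endswith_iff]
  unfold PySem.Int.toChars
  by_cases hn : n < 0
  · rw [if_pos hn, if_neg (by nlinarith : ¬ n * n < 0)]
    constructor
    · intro h
      exfalso
      have hmem : '-' ∈ Nat.toDigits 10 (n * n).toNat := h.subset (by simp)
      have := Nat.isDigit_of_mem_toDigits (by norm_num) (by norm_num) hmem
      simp [Char.isDigit] at this
    · rintro ⟨h, -⟩; omega
  · push_neg at hn
    rw [if_neg (by omega), if_neg (by push_neg; nlinarith : ¬ n * n < 0)]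
    have hsq : (n * n).toNat = n.toNat * n.toNat := by
      obtain ⟨m, rfl⟩ := Int.eq_ofNat_of_zero_le hn
      rw [← Int.natCast_mul, Int.toNat_natCast]
      simp
    rw [hsq, pvSuffix_iff]
    unfold pvAutoN pvDlen
    simp [hn]

theorem pvDlen_le_iff {m k : Nat} (hk : 0 < k) : pvDlen m ≤ k ↔ m < 10 ^ k :=
  Nat.length_toDigits_le_iff (by norm_num) hk

theorem pvDlen_pos (m : Nat) : 0 < pvDlen m := Nat.length_toDigits_pos

theorem pvDlen_lt (m : Nat) : m < 10 ^ pvDlen m :=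
  (pvDlen_le_iff (pvDlen_pos m)).1 le_rfl

theorem pvDlen_eq_iff {c d : Nat} (hd : 0 < d) :
    pvDlen c = d ↔ c < 10 ^ d ∧ (d = 1 ∨ 10 ^ (d - 1) ≤ c) := by
  constructor
  · intro h
    refine ⟨h ▸ pvDlen_lt c, ?_⟩
    by_cases h1 : d = 1
    · exact Or.inl h1
    · right
      by_contra hc
      push_neg at hc
      have : pvDlen c ≤ d - 1 := (pvDlen_le_iff (by omega)).2 hc
      omega
  · rintro ⟨h1, h2⟩
    have hle : pvDlen c ≤ d := (pvDlen_le_iff hd).2 h1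
    have hpos := pvDlen_pos c
    rcases h2 with rfl | h2
    · omega
    · by_cases hd1 : d = 1
      · omega
      · have hnot : ¬ pvDlen c ≤ d - 1 := by
          rw [pvDlen_le_iff (by omega)]
          omega
        omega

theorem pvE_def_eq (d : Nat) : pvEIter (10 ^ d) d 5 = pvE d := rfl

theorem pvE_odd {d : Nat} (hd : 0 < d) : pvE d % 2 = 1 := by
  have h := pvE_mod2 hd
  have h2 : (2:Nat) ∣ 2 ^ d := dvd_pow_self 2 (by omega)
  rw [← Nat.mod_mod_of_dvd _ h2, h]

theorem pvF_even {d : Nat} (hd : 0 < d) : pvF d % 2 = 0 := by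
  have h := pvF_mod2 hd
  have h2 : (2:Nat) ∣ 2 ^ d := dvd_pow_self 2 (by omega)
  rw [← Nat.mod_mod_of_dvd _ h2, h]

theorem pvEF_ne {d : Nat} (hd : 0 < d) : pvE d ≠ pvF d := by
  intro h
  have h1 := pvE_odd hd
  have h2 := pvF_even hd
  rw [h] at h1
  omega

theorem pvCands_one : pvCands 1 = [0, 1, 5, 6] := by decide

theorem pvCands_mem {d : Nat} (hd : 0 < d) (c : Nat) :
    c ∈ pvCands d ↔ (pvAutoN c ∧ pvDlen c = d) := by
  by_cases h1 : d = 1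
  · -- d = 1
    subst h1
    rw [pvCands_one]
    unfold pvAutoN
    constructor
    · intro h
      simp only [List.mem_cons, List.not_mem_nil, or_false] at h
      have hc : c < 10 := by rcases h with rfl | rfl | rfl | rfl <;> norm_num
      have hdl : pvDlen c = 1 := (pvDlen_eq_iff (by omega)).2 ⟨by simpa using hc, Or.inl rfl⟩
      refine ⟨?_, hdl⟩
      rw [hdl]
      rcases h with rfl | rfl | rfl | rfl <;> norm_num
    · rintro ⟨h, hdl⟩
      rw [hdl] at h
      have hc : c < 10 := by
        have := (pvDlen_eq_iff (by omega)).1 hdl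
        simpa using this.1
      interval_cases c <;> simp_all
  · -- d ≥ 2
    have hne : ¬ d = 1 := h1
    have hcands : pvCands d = ([min (pvE d) (pvF d), max (pvE d) (pvF d)]).filter
        (fun c => decide (10 ^ d ≤ c * 10)) := by
      unfold pvCands
      rw [if_neg hne, pvE_def_eq]
      rfl
    rw [hcands]
    have hpow : (10:Nat) ^ d = 10 ^ (d - 1) * 10 := by
      rw [← pow_succ]
      congr 1
      omega
    constructor
    · intro h
      rw [List.mem_filter] at h
      obtain ⟨hmem, hge⟩ := h
      have hge' : 10 ^ (d - 1) ≤ c := by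
        have := of_decide_eq_true hge
        rw [hpow] at this
        omega
      have hcef : c = pvE d ∨ c = pvF d := by
        rcases List.mem_cons.1 hmem with h' | h'
        · rcases le_total (pvE d) (pvF d) with hle | hle
          · exact Or.inl (by rw [h', min_eq_left hle])
          · exact Or.inr (by rw [h', min_eq_right hle])
        · simp only [List.mem_singleton] at h'
          rcases le_total (pvE d) (pvF d) with hle | hle
          · exact Or.inr (by rw [h', max_eq_right hle])
          · exact Or.inl (by rw [h', max_eq_left hle])
      have hlt : c < 10 ^ d := by
        rcases hcef with rfl | rfl
        · exact pvE_lt hd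
        · exact pvF_lt hd
      have hdl : pvDlen c = d := (pvDlen_eq_iff hd).2 ⟨hlt, Or.inr hge'⟩
      refine ⟨?_, hdl⟩
      unfold pvAutoN
      rw [hdl]
      exact (pvIdem_iff hd hlt).2 (Or.inr (Or.inr (by tauto)))
    · rintro ⟨hauto, hdl⟩
      obtain ⟨hlt, hge⟩ := (pvDlen_eq_iff hd).1 hdl
      rcases hge with h' | hge'
      · omega
      unfold pvAutoN at hauto
      rw [hdl] at hauto
      have hidem := (pvIdem_iff hd hlt).1 hauto
      have h10 : (10:Nat) ≤ 10 ^ (d - 1) := by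
        calc (10:Nat) = 10 ^ 1 := (pow_one 10).symm
          _ ≤ 10 ^ (d-1) := Nat.pow_le_pow_right (by norm_num) (by omega)
      have hcef : c = pvE d ∨ c = pvF d := by
        rcases hidem with rfl | rfl | h' | h'
        · omega
        · omega
        · exact Or.inl h'
        · exact Or.inr h'
      rw [List.mem_filter]
      constructor
      · rcases hcef with rfl | rfl
        · rcases le_total (pvE d) (pvF d) with hle | hle
          · exact List.mem_cons.2 (Or.inl (min_eq_left hle).symm)
          · exact List.mem_cons.2 (Or.inr (by simp [max_eq_left hle]))
        · rcases le_total (pvE d) (pvF d) with hle | hle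
          · exact List.mem_cons.2 (Or.inr (by simp [max_eq_right hle]))
          · exact List.mem_cons.2 (Or.inl (min_eq_right hle).symm)
      · rw [decide_eq_true_iff, hpow]
        omega

theorem pvCands_pairwise {d : Nat} (hd : 0 < d) : (pvCands d).Pairwise (· < ·) := by
  by_cases h1 : d = 1
  · subst h1
    rw [pvCands_one]
    decide
  · have hne : ¬ d = 1 := h1
    have hcands : pvCands d = ([min (pvE d) (pvF d), max (pvE d) (pvF d)]).filter
        (fun c => decide (10 ^ d ≤ c * 10)) := by
      unfold pvCands
      rw [if_neg hne, pvE_def_eq]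
      rfl
    rw [hcands]
    apply List.Pairwise.filter
    have := pvEF_ne hd
    constructor
    · intro b hb
      simp only [List.mem_singleton] at hb
      subst hb
      rcases le_total (pvE d) (pvF d) with hle | hle
      · rw [min_eq_left hle, max_eq_right hle]; omega
      · rw [min_eq_right hle, max_eq_left hle]; omega
    · simp

theorem pvCond_iff (end_ : Int) {d : Nat} (hd : 0 < d) :
    (((10 ^ (d - 1) : Nat) : Int) ≤ max end_ 1) ↔ d ≤ pvDlen (max end_ 1).toNat := by
  have hM : (1:Int) ≤ max end_ 1 := le_max_right _ _
  set n := (max end_ 1).toNat with hn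
  have hMt : (n : Int) = max end_ 1 := Int.toNat_of_nonneg (by omega)
  have hn1 : 1 ≤ n := by omega
  rw [← hMt, Int.ofNat_le]
  have hpos := pvDlen_pos n
  by_cases h1 : d = 1
  · subst h1
    simp only [Nat.sub_self, pow_zero]
    constructor
    · intro _; omega
    · intro _; omega
  · have hd2 : 2 ≤ d := by omega
    constructor
    · intro h
      by_contra hc
      push_neg at hc
      have h2 : pvDlen n ≤ d - 1 := by omega
      rw [pvDlen_le_iff (show 0 < d - 1 by omega)] at h2
      omega
    · intro h
      by_contra hc
      push_neg at hc
      have h2 : pvDlen n ≤ d - 1 := (pvDlen_le_iff (show 0 < d - 1 by omega)).2 (by omega)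
      omega

theorem pvLoopB_eq (start end_ : Int) :
    ∀ (fuel d : Nat) (res : List Int), 0 < d → pvDlen (max end_ 1).toNat < d + fuel →
    pvLoopB start end_ fuel d res =
      res ++ (List.range' d (pvDlen (max end_ 1).toNat + 1 - d)).flatMap
        (fun k => ((pvCands k).map (fun (c : Nat) => (c : Int))).filter
                    (fun c => decide (start ≤ c) && decide (c ≤ end_))) := by
  intro fuel
  induction fuel with
  | zero =>
    intro d res hd hfuel
    rw [pvLoopB]
    rw [show pvDlen (max end_ 1).toNat + 1 - d = 0 from by omega]
    simp
  | succ fuel ih =>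
    intro d res hd hfuel
    rw [pvLoopB]
    by_cases hcond : d ≤ pvDlen (max end_ 1).toNat
    · rw [if_pos ((pvCond_iff end_ hd).2 hcond)]
      rw [ih (d+1) _ (by omega) (by omega)]
      rw [show pvDlen (max end_ 1).toNat + 1 - d = (pvDlen (max end_ 1).toNat - d) + 1 from by omega,
          List.range'_succ]
      simp only [List.flatMap_cons, List.append_assoc]
      rw [show pvDlen (max end_ 1).toNat + 1 - (d+1) = pvDlen (max end_ 1).toNat - d from by omega]
    · rw [if_neg (fun h => hcond ((pvCond_iff end_ hd).1 h))]
      rw [show pvDlen (max end_ 1).toNat + 1 - d = 0 from by omega]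
      simp

theorem pvDlen_mono' {m m' : Nat} (h : m ≤ m') : pvDlen m ≤ pvDlen m' := by
  rw [pvDlen_le_iff (pvDlen_pos m')]
  exact lt_of_le_of_lt h ((pvDlen_le_iff (pvDlen_pos m')).1 le_rfl)

theorem pvDlen_le_succ_self (m : Nat) : pvDlen m ≤ m + 1 := by
  rcases Nat.eq_zero_or_pos m with rfl | hm
  · rw [pvDlen_le_iff (by omega)]
    norm_num
  · have h1 : pvDlen m ≤ m := by
      rw [pvDlen_le_iff hm]
      exact Nat.lt_pow_self (by norm_num)
    omega

theorem automorphic_spec_main (start end_ : Int) :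
    automorphic_numbers_in_range_while start end_ = automorphic_numbers_in_range_while_alt start end_ := by
  unfold automorphic_numbers_in_range_while automorphic_numbers_in_range_while_alt
  have hfuel : pvDlen (max end_ 1).toNat < 1 + ((max end_ 1).toNat + 1) := by
    have := pvDlen_le_succ_self (max end_ 1).toNat
    omega
  rw [pvLoopA_eq, pvLoopB_eq start end_ _ 1 [] one_pos hfuel]
  simp only [List.nil_append]
  set D := pvDlen (max end_ 1).toNat with hD
  have hD1 : 0 < D := pvDlen_pos _
  apply pvSortedExt
  · -- A-list strictly increasing
    apply List.Pairwise.sublist List.filter_sublist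
    rw [List.pairwise_map]
    apply List.Pairwise.imp ?_ List.pairwise_lt_range
    intro a b hab
    omega
  · -- B-list strictly increasing
    rw [List.pairwise_flatMap]
    constructor
    · intro k hk
      have hk1 : 0 < k := by
        rw [List.mem_range'] at hk
        omega
      apply List.Pairwise.filter
      rw [List.pairwise_map]
      apply List.Pairwise.imp ?_ (pvCands_pairwise hk1)
      intro a b hab
      exact_mod_cast hab
    · have hr : (List.range' 1 D).Pairwise (· < ·) := by
        apply List.Pairwise.imp ?_ (List.pairwise_lt_range' ..)
        intro a b h
        exact h
      apply List.Pairwise.imp_of_mem ?_ hr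
      intro k1 k2 hm1 hm2 hlt x hx y hy
      rw [List.mem_range'] at hm1 hm2
      have hk1 : 0 < k1 := by omega
      have hk2 : 0 < k2 := by omega
      rw [List.mem_filter, List.mem_map] at hx hy
      obtain ⟨⟨c1, hc1, rfl⟩, -⟩ := hx
      obtain ⟨⟨c2, hc2, rfl⟩, -⟩ := hy
      have h1 := (pvCands_mem hk1 c1).1 hc1
      have h2 := (pvCands_mem hk2 c2).1 hc2
      have hb1 : c1 < 10 ^ k1 := ((pvDlen_eq_iff hk1).1 h1.2).1
      have hb2 : 10 ^ (k2 - 1) ≤ c2 := by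
        rcases ((pvDlen_eq_iff hk2).1 h2.2).2 with h' | h'
        · omega
        · exact h'
      have hpow : (10:Nat) ^ k1 ≤ 10 ^ (k2 - 1) := Nat.pow_le_pow_right (by norm_num) (by omega)
      have : c1 < c2 := by omega
      exact_mod_cast this
  · -- same members
    intro x
    rw [List.mem_filter, List.mem_flatMap]
    constructor
    · rintro ⟨hmem, hauto⟩
      rw [List.mem_map] at hmem
      obtain ⟨k, hk, rfl⟩ := hmem
      rw [List.mem_range] at hk
      have hle : start ≤ start + (k : Int) ∧ start + (k : Int) ≤ end_ := by
        constructor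
        · omega
        · omega
      obtain ⟨h0, hN⟩ := (pvIsAuto_iff _).1 hauto
      set x := start + (k : Int)
      refine ⟨pvDlen x.toNat, ?_, ?_⟩
      · rw [List.mem_range']
        refine ⟨pvDlen x.toNat - 1, ?_, by have := pvDlen_pos x.toNat; omega⟩
        have hxM : x.toNat ≤ (max end_ 1).toNat := by omega
        have := pvDlen_mono' hxM
        have := pvDlen_pos x.toNat
        omega
      · rw [List.mem_filter, List.mem_map]
        refine ⟨⟨x.toNat, ?_, by omega⟩, ?_⟩
        · rw [pvCands_mem (pvDlen_pos x.toNat)]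
          exact ⟨hN, rfl⟩
        · simp only [Bool.and_eq_true, decide_eq_true_iff]
          omega
    · rintro ⟨k, hk, hx⟩
      rw [List.mem_range'] at hk
      obtain ⟨i, hi, hki⟩ := hk
      rw [List.mem_filter, List.mem_map] at hx
      obtain ⟨⟨c, hc, rfl⟩, hrange⟩ := hx
      simp only [Bool.and_eq_true, decide_eq_true_iff] at hrange
      have hk1 : 0 < k := by omega
      have hcm := (pvCands_mem hk1 c).1 hc
      constructor
      · rw [List.mem_map]
        refine ⟨((c : Int) - start).toNat, ?_, by omega⟩
        rw [List.mem_range]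
        omega
      · rw [pvIsAuto_iff]
        refine ⟨by omega, ?_⟩
        simpa using hcm.1

-- ===== VERDICT (by name: the statement is the Claim_ definition above) =====
theorem automorphic_numbers_in_range_while_spec : Claim_equal_automorphic_numbers_in_range_while := by
  intro start end_ _
  unfold Spec_automorphic_numbers_in_range_while
  exact automorphic_spec_main start end_
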